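-- pv_equiv track=rewrite | github.com/vamsimessi10/General-Python-Codes | graph.py | matofnode
-- ===== SOURCE A (Python) =====
-- def matofnode(node,lst,num_nodes):
--     l = [0 for i in range(num_nodes)]
--     l[node] = 0
--     for i in lst:
--         if i[0] == node:
--             for j in range(num_nodes):
--                 if j == i[1]:
--                     l[i[1]] = 1
--     return l
-- ===== SOURCE B (Python) =====
-- def matofnode(node, lst, num_nodes):
--     targets = {e[1] for e in lst if e[0] == node}
--     return [1 if j in targets else 0 for j in range(num_nodes)]
-- ===== Notes on version B (the rewrite author's own statement) =====
-- stated objective: simpler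
-- what changed: A walks the edge list and, per matching edge, scans all num_nodes indices to mark the target; B builds a set of targets in one pass over the edges and then emits the row by a single membership pass over range(num_nodes), eliminating the nested per-edge node scan.
import Mathlib
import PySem

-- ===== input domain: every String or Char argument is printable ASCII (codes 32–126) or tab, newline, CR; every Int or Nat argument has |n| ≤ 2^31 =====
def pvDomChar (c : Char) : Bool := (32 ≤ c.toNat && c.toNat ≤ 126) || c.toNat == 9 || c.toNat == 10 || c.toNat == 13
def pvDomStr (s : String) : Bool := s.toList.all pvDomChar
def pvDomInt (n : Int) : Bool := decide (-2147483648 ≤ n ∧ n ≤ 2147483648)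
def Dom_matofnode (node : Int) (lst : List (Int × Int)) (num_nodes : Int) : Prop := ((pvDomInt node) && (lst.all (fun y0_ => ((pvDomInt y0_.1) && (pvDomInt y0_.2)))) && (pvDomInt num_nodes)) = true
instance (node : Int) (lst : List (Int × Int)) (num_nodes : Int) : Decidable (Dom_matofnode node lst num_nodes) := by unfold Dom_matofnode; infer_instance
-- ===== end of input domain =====

-- B replaces A's nested per-edge scan over all node indices by one pass collecting the
-- target set and one membership pass over the node range (objective: simpler).

-- ===== PORT A =====
def matofnode (node : Int) (lst : List (Int × Int)) (num_nodes : Int) : List Int :=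
  -- l = [0 for i in range(num_nodes)]
  let l := (PySem.List.pyRange 0 num_nodes 1).map (fun _ => (0 : Int))
  -- l[node] = 0  (pySetD is the total form of the assignment; exact under Pre_, which puts node in range)
  let l := PySem.List.pySetD l node 0
  -- for i in lst: if i[0] == node: for j in range(num_nodes): if j == i[1]: l[i[1]] = 1
  lst.foldl (fun l i =>
    if i.1 == node then
      (PySem.List.pyRange 0 num_nodes 1).foldl
        (fun l j => if j == i.2 then PySem.List.pySetD l i.2 1 else l) l
    else l) l

-- ===== PORT B =====
def matofnode_alt (node : Int) (lst : List (Int × Int)) (num_nodes : Int) : List Int :=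
  -- targets = {e[1] for e in lst if e[0] == node}
  let targets : PySem.Set Int :=
    PySem.Set.ofList ((lst.filter (fun e => e.1 == node)).map (fun e => e.2))
  -- [1 if j in targets else 0 for j in range(num_nodes)]
  (PySem.List.pyRange 0 num_nodes 1).map
    (fun j => if PySem.Set.contains targets j then (1 : Int) else 0)

-- ===== PRECONDITION & SPEC =====
-- A raises IndexError at 'l[node] = 0' unless -num_nodes ≤ node < num_nodes (in particular whenever num_nodes ≤ 0).
def Pre_matofnode (node : Int) (lst : List (Int × Int)) (num_nodes : Int) : Prop :=
  -num_nodes ≤ node ∧ node < num_nodes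
instance (node : Int) (lst : List (Int × Int)) (num_nodes : Int) : Decidable (Pre_matofnode node lst num_nodes) := by unfold Pre_matofnode; infer_instance

def pvWitness_matofnode : Int × (List (Int × Int)) × Int := (1, [(1, 2), (1, 0), (0, 3), (1, -1), (1, 9)], 4)

def Spec_matofnode (node : Int) (lst : List (Int × Int)) (num_nodes : Int) (out : List Int) : Prop := out = matofnode_alt node lst num_nodes
instance (node : Int) (lst : List (Int × Int)) (num_nodes : Int) (out : List Int) : Decidable (Spec_matofnode node lst num_nodes out) := by unfold Spec_matofnode; infer_instance

-- ===== CLAIM (what is proved, stated in full; the proofs are below) =====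
def Claim_equal_matofnode : Prop := ∀ (node : Int) (lst : List (Int × Int)) (num_nodes : Int), Dom_matofnode node lst num_nodes → Pre_matofnode node lst num_nodes → Spec_matofnode node lst num_nodes (matofnode node lst num_nodes)

-- ===== LEMMAS AND PROOFS =====

-- 'pvRow n T': the adjacency row over range(n) determined by membership in the target list T.
def pvRow (n : Int) (T : List Int) : List Int :=
  (PySem.List.pyRange 0 n 1).map (fun j => if j ∈ T then (1 : Int) else 0)

theorem pvRow_nil (n : Int) : pvRow n [] = List.replicate n.toNat 0 := by
  simp [pvRow]

-- setting a 0 anywhere in the all-zero row is a no-op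
theorem pvSetD_zero (m : Nat) (i : Int) :
    PySem.List.pySetD (List.replicate m (0 : Int)) i 0 = List.replicate m 0 := by
  simp only [PySem.List.pySetD, PySem.List.pySet?, List.set_replicate_self]
  rcases h : PySem.List.pyIdx? m i with _ | k <;> simp [h]

-- setting index t (0 ≤ t < n) to 1 appends t to the target list
theorem pvSetD_row (n : Int) (T : List Int) (t : Int) (h0 : 0 ≤ t) (h1 : t < n) :
    PySem.List.pySetD (pvRow n T) t 1 = pvRow n (T ++ [t]) := by
  rw [PySem.List.pySetD_of_nonneg (pvRow n T) 1 h0]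
  apply List.ext_getElem
  · simp [pvRow]
  · intro m hm1 hm2
    have hlen : m < (n - 0).toNat := by
      simpa [pvRow, PySem.List.length_pyRange_one] using hm1
    simp only [pvRow, List.getElem_set, List.getElem_map,
      PySem.List.getElem_pyRange_one, zero_add]
    by_cases hmt : m = t.toNat
    · subst hmt
      have : (t.toNat : Int) = t := Int.toNat_of_nonneg h0
      simp [this]
    · have : (m : Int) ≠ t := by omega
      have hmt' : t.toNat ≠ m := by omega
      simp [hmt', this]

-- a target outside range(n) does not change the row
theorem pvRow_append_out (n : Int) (T : List Int) (t : Int) (h : ¬ (0 ≤ t ∧ t < n)) :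
    pvRow n (T ++ [t]) = pvRow n T := by
  unfold pvRow
  apply List.map_congr_left
  intro j hj
  rw [PySem.List.mem_pyRange_one] at hj
  have : j ≠ t := by omega
  simp [this]

-- the inner 'for j in range(a,n)' loop sets index t to 1 exactly when a ≤ t < n
theorem pvInner (n t : Int) : ∀ (F : Nat) (a : Int), (n - a).toNat = F → ∀ (s : List Int),
    (PySem.List.pyRange a n 1).foldl
      (fun l j => if j == t then PySem.List.pySetD l t 1 else l) s
    = if a ≤ t ∧ t < n then PySem.List.pySetD s t 1 else s := by
  intro F
  induction F with
  | zero =>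
    intro a hF s
    rw [PySem.List.pyRange_one_eq_nil (by omega), List.foldl_nil, if_neg (by omega)]
  | succ F ih =>
    intro a hF s
    have hlt : a < n := by omega
    rw [PySem.List.pyRange_one_cons hlt, List.foldl_cons]
    by_cases hat : a = t
    · subst hat
      rw [if_pos (by simp), ih (a + 1) (by omega), if_neg (by omega),
        if_pos ⟨le_refl a, hlt⟩]
    · rw [if_neg (by simp [hat]), ih (a + 1) (by omega)]
      by_cases hc : a ≤ t ∧ t < n
      · rw [if_pos (by omega), if_pos hc]
      · rw [if_neg (by omega), if_neg hc]

-- the outer loop accumulates exactly the in-order targets of edges leaving 'node'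
theorem pvOuter (node n : Int) (lst : List (Int × Int)) : ∀ (T : List Int),
    lst.foldl (fun l i =>
      if i.1 == node then
        (PySem.List.pyRange 0 n 1).foldl
          (fun l j => if j == i.2 then PySem.List.pySetD l i.2 1 else l) l
      else l) (pvRow n T)
    = pvRow n (T ++ (lst.filter (fun e => e.1 == node)).map (fun e => e.2)) := by
  induction lst with
  | nil => intro T; simp
  | cons e rest ih =>
    intro T
    rw [List.foldl_cons]
    by_cases he : e.1 = node
    · rw [if_pos (by simp [he]), pvInner n e.2 (n - 0).toNat 0 rfl]
      have step : (if 0 ≤ e.2 ∧ e.2 < n then PySem.List.pySetD (pvRow n T) e.2 1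
          else pvRow n T) = pvRow n (T ++ [e.2]) := by
        by_cases hr : 0 ≤ e.2 ∧ e.2 < n
        · rw [if_pos hr, pvSetD_row n T e.2 hr.1 hr.2]
        · rw [if_neg hr, pvRow_append_out n T e.2 hr]
      rw [step, ih (T ++ [e.2])]
      simp [List.filter_cons, he]
    · rw [if_neg (by simp [he]), ih T]
      simp [List.filter_cons, he]

theorem pvContains_row (n : Int) (tl : List Int) :
    (PySem.List.pyRange 0 n 1).map
      (fun j => if PySem.Set.contains (PySem.Set.ofList tl) j then (1 : Int) else 0)
    = pvRow n tl := by
  unfold pvRow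
  apply List.map_congr_left
  intro j _
  by_cases h : j ∈ tl
  · simp [PySem.Set.contains_iff, PySem.Set.mem_ofList, h]
  · have hc : ¬ PySem.Set.contains (PySem.Set.ofList tl) j = true := by
      simp [PySem.Set.contains_iff, PySem.Set.mem_ofList, h]
    simp [hc, h]

-- ===== VERDICT (by name: the statement is the Claim_ definition above) =====
theorem matofnode_spec : Claim_equal_matofnode := by
  intro node lst num_nodes _ _
  unfold Spec_matofnode matofnode matofnode_alt
  dsimp only
  rw [pvContains_row]
  have h0 : (PySem.List.pyRange 0 num_nodes 1).map (fun _ => (0 : Int))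
      = pvRow num_nodes [] := by simp [pvRow_nil]
  rw [h0, pvRow_nil, pvSetD_zero, ← pvRow_nil]
  simpa using pvOuter node num_nodes lst []
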